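-- pv_equiv track=rewrite | github.com/EmYeuVatLy/AIB3_LUCVIHOANGDE_VONG2 | core/llm_client.py | _strip_think_tags
-- ===== SOURCE A (Python) =====
-- def _strip_think_tags(text: str) -> str:
--     """Robustly strip all <think>...</think> blocks from Qwen3 output.
--     Handles: nested blocks, truncated blocks (no closing tag), multiple blocks."""
--     if not text:
--         return ""
--     open_tag = "<think>"
--     close_tag = "</think>"
--     result = []
--     idx = 0
--     depth = 0
--     while idx < len(text):
--         if text.startswith(open_tag, idx):
--             depth += 1
--             idx += len(open_tag)
--             continue
--         if text.startswith(close_tag, idx):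
--             if depth > 0:
--                 depth -= 1
--             idx += len(close_tag)
--             continue
--         if depth == 0:
--             result.append(text[idx])
--         idx += 1
--     return "".join(result).strip()
-- ===== SOURCE B (Python) =====
-- def _strip_think_tags(text: str) -> str:
--     """Strip all <think>...</think> blocks by jumping between tag boundaries
--     (slice-based) instead of scanning character by character."""
--     open_tag = "<think>"
--     close_tag = "</think>"
--     parts = []
--     idx = 0
--     depth = 0
--     while True:
--         i = text.find(open_tag, idx)
--         j = text.find(close_tag, idx)
--         if i != -1 and (j == -1 or i < j):
--             if depth == 0:
--                 parts.append(text[idx:i])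
--             depth += 1
--             idx = i + len(open_tag)
--         elif j != -1:
--             if depth == 0:
--                 parts.append(text[idx:j])
--             if depth > 0:
--                 depth -= 1
--             idx = j + len(close_tag)
--         else:
--             if depth == 0:
--                 parts.append(text[idx:])
--             break
--     return "".join(parts).strip()
-- ===== Notes on version B (the rewrite author's own statement) =====
-- stated objective: faster
-- what changed: Replaces A's per-character depth scan (startswith test and single-character append at every index) by a tag-to-tag jump loop: str.find locates the next <think>/</think>, the whole slice before the earlier tag is copied at depth 0, and the scan jumps past the tag.
import Mathlib
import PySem

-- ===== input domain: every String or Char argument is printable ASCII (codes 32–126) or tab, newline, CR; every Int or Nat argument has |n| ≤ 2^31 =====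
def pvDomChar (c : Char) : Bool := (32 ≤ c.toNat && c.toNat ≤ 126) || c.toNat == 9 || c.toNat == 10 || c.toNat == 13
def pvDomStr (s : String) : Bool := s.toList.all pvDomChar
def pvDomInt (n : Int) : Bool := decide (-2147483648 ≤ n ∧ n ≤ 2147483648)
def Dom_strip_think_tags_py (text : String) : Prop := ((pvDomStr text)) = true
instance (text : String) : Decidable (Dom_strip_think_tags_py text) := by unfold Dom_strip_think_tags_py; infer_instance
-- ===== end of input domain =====

-- B replaces A's per-character depth scan by a tag-to-tag jump loop (find next tag, copy whole
-- slices between tags when depth is 0); objective: alternative traversal, same exact result.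

def pvOtag : List Char := ['<', 't', 'h', 'i', 'n', 'k', '>']
def pvCtag : List Char := ['<', '/', 't', 'h', 'i', 'n', 'k', '>']

-- ===== PORT A =====
-- A's while loop over idx/depth, as structural recursion on the remaining suffix of the text.
def pvLoopA (cs : List Char) (depth : Int) : List Char :=
  if pvOtag.isPrefixOf cs then
    pvLoopA (cs.drop 7) (depth + 1)
  else if pvCtag.isPrefixOf cs then
    pvLoopA (cs.drop 8) (if depth > 0 then depth - 1 else depth)
  else
    match cs with
    | [] => []
    | c :: t => (if depth = 0 then [c] else []) ++ pvLoopA t depth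
termination_by cs.length
decreasing_by
  · have h7 : 7 ≤ cs.length := by
      have := List.IsPrefix.length_le (List.isPrefixOf_iff_prefix.mp (by assumption))
      simpa [pvOtag] using this
    simp; omega
  · have h8 : 8 ≤ cs.length := by
      have := List.IsPrefix.length_le (List.isPrefixOf_iff_prefix.mp (by assumption))
      simpa [pvCtag] using this
    simp; omega
  · simp

def strip_think_tags_py (text : String) : String :=
  if text = "" then "" else PySem.Str.strip (String.mk (pvLoopA text.toList 0))

-- ===== PORT B =====
-- text.find(tag, idx) on the remaining suffix; some p = index of first occurrence, none = -1.
def pvFindSub (pat : List Char) : List Char → Option Nat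
  | [] => if pat.isPrefixOf ([] : List Char) then some 0 else none
  | c :: t => if pat.isPrefixOf (c :: t) then some 0 else (pvFindSub pat t).map (· + 1)

theorem pvFindSub_lt {pat : List Char} (hp : pat ≠ []) :
    ∀ cs p, pvFindSub pat cs = some p → p < cs.length := by
  intro cs
  induction cs with
  | nil =>
    intro p h
    simp [pvFindSub, List.isPrefixOf_iff_prefix, List.prefix_nil, hp] at h
  | cons c t ih =>
    intro p h
    by_cases hpre : pat.isPrefixOf (c :: t)
    · simp [pvFindSub, hpre] at h
      simp [← h]
    · simp [pvFindSub, hpre] at h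
      obtain ⟨q, hq, rfl⟩ := h
      have := ih q hq
      simp; omega

-- B's while loop: jump to the earliest of the next open/close tag, copying the slice before it
-- when depth = 0 (branch order mirrors Source B: `i != -1 and (j == -1 or i < j)`, `elif j != -1`).
def pvLoopB (cs : List Char) (depth : Int) : List Char :=
  match hi : pvFindSub pvOtag cs, hj : pvFindSub pvCtag cs with
  | some i, none =>
      (if depth = 0 then cs.take i else []) ++ pvLoopB (cs.drop (i + 7)) (depth + 1)
  | some i, some j =>
      if i < j then
        (if depth = 0 then cs.take i else []) ++ pvLoopB (cs.drop (i + 7)) (depth + 1)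
      else
        (if depth = 0 then cs.take j else []) ++
          pvLoopB (cs.drop (j + 8)) (if depth > 0 then depth - 1 else depth)
  | none, some j =>
      (if depth = 0 then cs.take j else []) ++
        pvLoopB (cs.drop (j + 8)) (if depth > 0 then depth - 1 else depth)
  | none, none => if depth = 0 then cs else []
termination_by cs.length
decreasing_by
  · have := pvFindSub_lt (pat := pvOtag) (by decide) cs i hi; simp; omega
  · have := pvFindSub_lt (pat := pvOtag) (by decide) cs i hi; simp; omega
  · have := pvFindSub_lt (pat := pvCtag) (by decide) cs j hj; simp; omega
  · have := pvFindSub_lt (pat := pvCtag) (by decide) cs j hj; simp; omega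

def strip_think_tags_py_alt (text : String) : String :=
  PySem.Str.strip (String.mk (pvLoopB text.toList 0))

-- ===== PRECONDITION & SPEC =====
def Spec_strip_think_tags_py (text : String) (out : String) : Prop := out = strip_think_tags_py_alt text
instance (text : String) (out : String) : Decidable (Spec_strip_think_tags_py text out) := by unfold Spec_strip_think_tags_py; infer_instance

-- ===== CLAIM (what is proved, stated in full; the proofs are below) =====
def Claim_equal_strip_think_tags_py : Prop := ∀ (text : String), Dom_strip_think_tags_py text → Spec_strip_think_tags_py text (strip_think_tags_py text)

-- ===== LEMMAS AND PROOFS =====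

theorem pvNotBoth (cs : List Char) (h1 : pvOtag.isPrefixOf cs) (h2 : pvCtag.isPrefixOf cs) :
    False := by
  rcases cs with _ | ⟨a, _ | ⟨b, t⟩⟩ <;>
    simp [pvOtag, pvCtag, List.isPrefixOf] at h1 h2
  exact absurd (h1.2.1 ▸ h2.2.1) (by decide)

theorem pvFindSub_pos {pat : List Char} {cs : List Char} {p : Nat}
    (hnp : ¬ pat.isPrefixOf cs) (h : pvFindSub pat cs = some p) : 0 < p := by
  cases cs with
  | nil => simp [pvFindSub, hnp] at h
  | cons c t =>
    simp [pvFindSub, hnp] at h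
    obtain ⟨q, _, rfl⟩ := h
    omega

theorem pvLoopB_none {cs : List Char} (hi : pvFindSub pvOtag cs = none)
    (hj : pvFindSub pvCtag cs = none) (d : Int) :
    pvLoopB cs d = if d = 0 then cs else [] := by
  rw [pvLoopB.eq_def]
  split <;> simp_all

theorem pvLoopB_open {cs : List Char} {i : Nat} (hi : pvFindSub pvOtag cs = some i)
    (hj : ∀ j, pvFindSub pvCtag cs = some j → i < j) (d : Int) :
    pvLoopB cs d = (if d = 0 then cs.take i else []) ++ pvLoopB (cs.drop (i + 7)) (d + 1) := by
  rw [pvLoopB.eq_def]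
  split <;> simp_all

theorem pvLoopB_close_none {cs : List Char} {j : Nat} (hi : pvFindSub pvOtag cs = none)
    (hj : pvFindSub pvCtag cs = some j) (d : Int) :
    pvLoopB cs d = (if d = 0 then cs.take j else []) ++
      pvLoopB (cs.drop (j + 8)) (if d > 0 then d - 1 else d) := by
  rw [pvLoopB.eq_def]
  split <;> simp_all

theorem pvLoopB_close_ge {cs : List Char} {i j : Nat} (hi : pvFindSub pvOtag cs = some i)
    (hj : pvFindSub pvCtag cs = some j) (hge : ¬ i < j) (d : Int) :
    pvLoopB cs d = (if d = 0 then cs.take j else []) ++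
      pvLoopB (cs.drop (j + 8)) (if d > 0 then d - 1 else d) := by
  rw [pvLoopB.eq_def]
  split <;> simp_all

theorem pvFindSub_shift {pat : List Char} {c : Char} {t : List Char}
    (h : ¬ pat.isPrefixOf (c :: t)) :
    pvFindSub pat (c :: t) = (pvFindSub pat t).map (· + 1) := by
  simp [pvFindSub, h]

theorem pvLoop_eq_aux : ∀ n, ∀ cs : List Char, cs.length ≤ n → ∀ d : Int,
    pvLoopA cs d = pvLoopB cs d := by
  intro n
  induction n with
  | zero =>
    intro cs h d
    have : cs = [] := by cases cs <;> simp at h ⊢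
    subst this
    rw [pvLoopA.eq_def, pvLoopB.eq_def]
    simp [pvOtag, pvCtag, pvFindSub, List.isPrefixOf]
  | succ n ih =>
    intro cs hlen d
    by_cases h1 : pvOtag.isPrefixOf cs
    · have h7 : 7 ≤ cs.length := by
        have := List.IsPrefix.length_le (List.isPrefixOf_iff_prefix.mp h1)
        simpa [pvOtag] using this
      have h2 : ¬ pvCtag.isPrefixOf cs := fun h2 => pvNotBoth cs h1 h2
      have hi : pvFindSub pvOtag cs = some 0 := by
        cases cs with
        | nil => simp at h7
        | cons c t => simp [pvFindSub, h1]
      have hjpos : ∀ j, pvFindSub pvCtag cs = some j → 0 < j :=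
        fun j hj => pvFindSub_pos h2 hj
      rw [pvLoopA.eq_def, pvLoopB_open hi hjpos]
      simp only [h1, if_true, List.take_zero, List.nil_append, Nat.zero_add, ite_self,
        List.append_nil]
      have := ih (cs.drop 7) (by simp; omega) (d + 1)
      simpa using this
    · by_cases h2 : pvCtag.isPrefixOf cs
      · have h8 : 8 ≤ cs.length := by
          have := List.IsPrefix.length_le (List.isPrefixOf_iff_prefix.mp h2)
          simpa [pvCtag] using this
        have hj : pvFindSub pvCtag cs = some 0 := by
          cases cs with
          | nil => simp at h8
          | cons c t => simp [pvFindSub, h2]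
        have hrec := ih (cs.drop 8) (by simp; omega) (if d > 0 then d - 1 else d)
        have hB : pvLoopB cs d = pvLoopB (cs.drop 8) (if d > 0 then d - 1 else d) := by
          cases hi : pvFindSub pvOtag cs with
          | none => simp [pvLoopB_close_none hi hj]
          | some i => simp [pvLoopB_close_ge hi hj (by omega)]
        rw [pvLoopA.eq_def, hB]
        simp only [h1, if_false, h2, if_true]
        exact hrec
      · cases cs with
        | nil =>
          rw [pvLoopA.eq_def, pvLoopB_none (by decide) (by decide)]
          simp [pvOtag, pvCtag]
        | cons c t =>
          have hrec := ih t (by simp at hlen ⊢; omega) d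
          have foi := pvFindSub_shift (pat := pvOtag) h1
          have foj := pvFindSub_shift (pat := pvCtag) h2
          have hA : pvLoopA (c :: t) d = (if d = 0 then [c] else []) ++ pvLoopA t d := by
            rw [pvLoopA.eq_def]; simp [h1, h2]
          rw [hA, hrec]
          cases hti : pvFindSub pvOtag t with
          | none =>
            cases htj : pvFindSub pvCtag t with
            | none =>
              rw [pvLoopB_none hti htj, pvLoopB_none (cs := c :: t) (by simp [foi, hti]) (by simp [foj, htj])]
              by_cases hd : d = 0 <;> simp [hd]
            | some r =>
              rw [pvLoopB_close_none hti htj,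
                pvLoopB_close_none (cs := c :: t) (by simp [foi, hti]) (j := r + 1) (by simp [foj, htj])]
              by_cases hd : d = 0 <;> simp [hd]
          | some q =>
            cases htj : pvFindSub pvCtag t with
            | none =>
              rw [pvLoopB_open hti (by simp [htj]),
                pvLoopB_open (cs := c :: t) (i := q + 1) (by simp [foi, hti]) (by simp [foj, htj])]
              by_cases hd : d = 0 <;> simp [hd]
            | some r =>
              by_cases hqr : q < r
              · rw [pvLoopB_open hti (by simp [htj]; omega),
                  pvLoopB_open (cs := c :: t) (i := q + 1) (by simp [foi, hti])
                    (by simp [foj, htj]; omega)]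
                by_cases hd : d = 0 <;> simp [hd]
              · rw [pvLoopB_close_ge hti htj hqr,
                  pvLoopB_close_ge (cs := c :: t) (i := q + 1) (j := r + 1) (by simp [foi, hti])
                    (by simp [foj, htj]) (by omega)]
                by_cases hd : d = 0 <;> simp [hd]

theorem pvLoop_eq (cs : List Char) (d : Int) : pvLoopA cs d = pvLoopB cs d :=
  pvLoop_eq_aux cs.length cs le_rfl d

-- ===== VERDICT (by name: the statement is the Claim_ definition above) =====
theorem strip_think_tags_py_spec : Claim_equal_strip_think_tags_py := by
  intro text _
  unfold Spec_strip_think_tags_py strip_think_tags_py strip_think_tags_py_alt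
  by_cases h : text = ""
  · subst h
    rw [if_pos rfl, pvLoopB_none (by decide) (by decide)]
    have h : (String.mk []).toList = [] := rfl
    simp [PySem.Str.strip, PySem.Chars.strip, PySem.Chars.lstrip, PySem.Chars.rstrip, h]
  · rw [if_neg h, pvLoop_eq]
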